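-- pv_equiv track=rewrite | github.com/AnmolPatil2/python3 | k.py | reddy
-- ===== SOURCE A (Python) =====
-- def reddy(z):
--     maxposition = 0
--     m = z[0]
--     for i in range(len(z)):
--         if(z[i] >= m):
--             m = z[i]
--             maxposition = i
--
--     return maxposition
-- ===== SOURCE B (Python) =====
-- def reddy(z):
--     m = max(z)
--     return len(z) - 1 - z[::-1].index(m)
-- ===== Notes on version B (the rewrite author's own statement) =====
-- stated objective: simpler
-- what changed: Replaces the running max-with-position loop by a two-phase decomposition: compute the maximum with max(), then locate its last index by taking the first match in the reversed list.
import Mathlib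
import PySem

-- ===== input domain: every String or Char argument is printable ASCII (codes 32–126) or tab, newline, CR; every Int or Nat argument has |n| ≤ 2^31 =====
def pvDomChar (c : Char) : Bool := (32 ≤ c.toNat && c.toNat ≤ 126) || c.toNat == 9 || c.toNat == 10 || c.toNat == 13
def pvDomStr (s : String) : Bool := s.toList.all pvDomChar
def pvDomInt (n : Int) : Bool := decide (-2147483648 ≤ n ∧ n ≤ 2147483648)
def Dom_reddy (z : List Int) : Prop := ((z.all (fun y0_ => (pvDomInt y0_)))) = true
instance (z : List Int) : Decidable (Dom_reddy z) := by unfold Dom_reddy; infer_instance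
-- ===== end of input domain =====

-- B replaces A's running max-with-position loop by a two-phase decomposition: max() first, then last index via first match in the reversed list.


-- ===== PORT A =====
-- literal port of A: maxposition = 0; m = z[0]; for i in range(len(z)): if z[i] >= m: m, maxposition = z[i], i
def reddy (z : List Int) : Int :=
  let m0 := PySem.List.pyGetD z 0 0     -- z[0]; in range under Pre_ (z ≠ [])
  let st := (PySem.List.pyRange 0 (z.length : Int) 1).foldl
    (fun (p : Int × Int) i =>
      if p.2 ≤ PySem.List.pyGetD z i 0 then (i, PySem.List.pyGetD z i 0) else p)
    (0, m0)
  st.1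

-- ===== PORT B =====
-- literal port of B: m = max(z); return len(z) - 1 - z[::-1].index(m)
def reddy_alt (z : List Int) : Int :=
  match PySem.List.max? z (fun y => y) with
  | none => 0                            -- max(z) raises on []; outside Pre_
  | some m =>
    let rev := (PySem.List.slice? z none none (-1)).getD []   -- z[::-1]
    let j := (PySem.List.index? rev m).getD 0                 -- .index never fails: m ∈ z
    (z.length : Int) - 1 - (j : Int)

-- ===== PRECONDITION & SPEC =====
-- Pre_ excludes only the empty list, on which A raises IndexError (z[0]).
def Pre_reddy (z : List Int) : Prop := z ≠ []
instance (z : List Int) : Decidable (Pre_reddy z) := by unfold Pre_reddy; infer_instance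
def pvWitness_reddy : List Int := [3, 7, 7, 2]

def Spec_reddy (z : List Int) (out : Int) : Prop := out = reddy_alt z
instance (z : List Int) (out : Int) : Decidable (Spec_reddy z out) := by unfold Spec_reddy; infer_instance

-- ===== CLAIM (what is proved, stated in full; the proofs are below) =====
def Claim_equal_reddy : Prop := ∀ (z : List Int), Dom_reddy z → Pre_reddy z → Spec_reddy z (reddy z)

-- ===== LEMMAS AND PROOFS =====

-- A's fold over indices, as a function of the list
def aFold (z : List Int) : Int × Int :=
  (PySem.List.pyRange 0 (z.length : Int) 1).foldl
    (fun (p : Int × Int) i =>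
      if p.2 ≤ PySem.List.pyGetD z i 0 then (i, PySem.List.pyGetD z i 0) else p)
    (0, PySem.List.pyGetD z 0 0)

theorem reddy_eq_aFold (z : List Int) : reddy z = (aFold z).1 := rfl

-- one append step of A's fold
theorem aFold_append (z : List Int) (x : Int) (hz : z ≠ []) :
    aFold (z ++ [x]) =
      (if (aFold z).2 ≤ x then ((z.length : Int), x) else aFold z) := by
  unfold aFold
  have hlen : ((z ++ [x]).length : Int) = (z.length : Int) + 1 := by
    simp
  rw [hlen, PySem.List.pyRange_one_succ_right (by positivity), List.foldl_append]
  have hinit : PySem.List.pyGetD (z ++ [x]) 0 0 = PySem.List.pyGetD z 0 0 := by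
    rw [PySem.List.pyGetD_zero, PySem.List.pyGetD_zero]
    cases z <;> simp_all
  have hcongr :
      (PySem.List.pyRange 0 (z.length : Int) 1).foldl
        (fun (p : Int × Int) i =>
          if p.2 ≤ PySem.List.pyGetD (z ++ [x]) i 0 then (i, PySem.List.pyGetD (z ++ [x]) i 0) else p)
        (0, PySem.List.pyGetD z 0 0)
      = (PySem.List.pyRange 0 (z.length : Int) 1).foldl
        (fun (p : Int × Int) i =>
          if p.2 ≤ PySem.List.pyGetD z i 0 then (i, PySem.List.pyGetD z i 0) else p)
        (0, PySem.List.pyGetD z 0 0) := by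
    apply PySem.List.foldl_congr_mem
    intro p i hi
    rw [PySem.List.mem_pyRange_one] at hi
    have hget : PySem.List.pyGetD (z ++ [x]) i 0 = PySem.List.pyGetD z i 0 := by
      rw [PySem.List.pyGetD_eq_getElem _ _ hi.1 (by simp; omega),
          PySem.List.pyGetD_eq_getElem _ _ hi.1 (by exact_mod_cast hi.2)]
      exact List.getElem_append_left (by omega)
    rw [hget]
  rw [hinit, hcongr]
  have hx : PySem.List.pyGetD (z ++ [x]) (z.length : Int) 0 = x := by
    rw [PySem.List.pyGetD_natCast]
    simp [List.getD]
  simp only [List.foldl_cons, List.foldl_nil, hx]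

-- invariant: A's fold carries (B's answer, max of z)
theorem main_inv (z : List Int) (hz : z ≠ []) :
    (aFold z).1 = reddy_alt z ∧ PySem.List.max? z (fun y => y) = some (aFold z).2 := by
  induction z using List.reverseRecOn with
  | nil => exact absurd rfl hz
  | append_singleton z x ih =>
    by_cases h : z = []
    · subst h
      simp only [List.nil_append]
      have ha : aFold [x] = (0, x) := by
        unfold aFold
        rw [show (([x] : List Int).length : Int) = 0 + 1 by simp,
            PySem.List.pyRange_one_singleton]
        simp [PySem.List.pyGetD_zero_cons]
      refine ⟨?_, ?_⟩
      · rw [ha]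
        show (0 : Int) = reddy_alt [x]
        unfold reddy_alt
        rw [PySem.List.max?_id_cons]
        simp [PySem.List.slice?_none_none_neg_one]
      · rw [ha, PySem.List.max?_id_cons]
        rfl
    · obtain ⟨ih1, ih2⟩ := ih h
      set m := (aFold z).2 with hm
      rw [aFold_append z x h]
      -- max of z ++ [x]
      obtain ⟨y, t, rfl⟩ : ∃ y t, z = y :: t := by
        cases z with | nil => exact absurd rfl h | cons y t => exact ⟨y, t, rfl⟩
      have hmax : PySem.List.max? ((y :: t) ++ [x]) (fun a => a) = some (max m x) := by
        have h1 := PySem.List.max?_id_cons y t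
        have h2 := PySem.List.max?_id_cons y (t ++ [x])
        rw [ih2] at h1
        rw [List.cons_append, h2, List.foldl_append]
        simp only [List.foldl_cons, List.foldl_nil]
        rw [Option.some_inj] at h1 ⊢
        rw [h1]
      have hrev : (PySem.List.slice? ((y :: t) ++ [x]) none none (-1)).getD []
          = x :: (y :: t).reverse := by
        rw [PySem.List.slice?_none_none_neg_one]
        simp
      by_cases hle : m ≤ x
      · -- new element becomes the (last) max
        rw [if_pos hle]
        constructor
        · show ((y :: t).length : Int) = reddy_alt ((y :: t) ++ [x])
          unfold reddy_alt
          rw [hmax]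
          simp only [hrev, max_eq_right hle, PySem.List.index?_cons_self]
          simp
        · rw [hmax, max_eq_right hle]
      · -- max stays in z
        rw [if_neg hle]
        have hne : x ≠ m := by intro hcontra; exact hle (le_of_eq hcontra.symm)
        have hmem : m ∈ (y :: t).reverse := by
          rw [List.mem_reverse]; exact PySem.List.max?_mem ih2
        obtain ⟨j, hj⟩ : ∃ j, PySem.List.index? (y :: t).reverse m = some j := by
          have := (PySem.List.index?_isSome_iff (y :: t).reverse m).mpr hmem
          exact Option.isSome_iff_exists.mp this
        constructor
        · rw [ih1]
          show reddy_alt (y :: t) = reddy_alt ((y :: t) ++ [x])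
          unfold reddy_alt
          rw [hmax, ih2]
          have e2 : PySem.List.index? (x :: (y :: t).reverse) m = some (j + 1) := by
            rw [PySem.List.index?_cons_of_ne _ hne, hj]; rfl
          simp only [PySem.List.slice?_none_none_neg_one, List.reverse_append,
            List.reverse_singleton, List.singleton_append, max_eq_left (le_of_not_ge hle),
            Option.getD_some, hj, e2, List.length_append, List.length_cons, List.length_nil]
          push_cast
          omega
        · rw [hmax, max_eq_left (le_of_not_ge hle)]

-- ===== VERDICT (by name: the statement is the Claim_ definition above) =====
theorem reddy_spec : Claim_equal_reddy := by
  intro z _ hz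
  show reddy z = reddy_alt z
  rw [reddy_eq_aFold]
  exact (main_inv z hz).1
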